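-- pv_equiv track=rewrite | github.com/13679659643/pythonprojects | crawler-logistics-provider-data/method.py | get_ordered_dict
-- ===== SOURCE A (Python) =====
-- from collections import OrderedDict
--
-- def get_ordered_dict(field_list: list, data_json: dict):
--     """
--     根据传入的过滤条件字段列表，补齐列表中没有的字段，构建一个有序的字典
--     :param data_json: 需要插入到数据库的字典数据-->{"age": "Alice", "name": 25, "city": "New York"}
--     :param field_list: 过滤条件字段-->["name", "age", "id", "city"]
--     :return: ordered_dict： dict-->OrderedDict([('name', 25), ('age', 'Alice'), ('id', 'None'), ('city', 'New York')])
--     type :<class 'collections.OrderedDict'>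
--     中间data_json： dict-->{'age': 'Alice', 'name': 25, 'city': 'New York', 'id': 'None'}
--     """
--     # 使用列表推导式创建一个新的列表 valid_field_order，这个列表只包含 field_list 中存在于 data_json 的字段
--     # 这个步骤是为了确保我们只处理 data_json 中实际存在的字段
--     # valid_field_order-->['name', 'age', 'city']
--     valid_field_order = [field for field in field_list if field in data_json]
--     # set_A -->{'name', 'city', 'age'}
--     set_A = set(valid_field_order)
--     # set_B -->{'name', 'id', 'city', 'age'}
--     set_B = set(field_list)
--     # 查找两个列表中不相同的字段 results-->{'id'}  type--><class 'set'>
--     results = set_A.symmetric_difference(set_B)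
--     if results:
--         for result in results:
--             data_json[result] = "None"
--     ordered_dict = OrderedDict([(field, data_json[field]) for field in field_list])
--     return ordered_dict
-- ===== SOURCE B (Python) =====
-- from collections import OrderedDict
--
-- def get_ordered_dict(field_list: list, data_json: dict):
--     # Build the result directly: one lookup with a default per field.
--     # No set construction, no fill pass, and data_json is not mutated
--     # (the equivalence is about the return value).
--     return OrderedDict((field, data_json.get(field, "None")) for field in field_list)
-- ===== Notes on version B (the rewrite author's own statement) =====
-- stated objective: simpler
-- what changed: B drops A's valid-list/two-sets/symmetric_difference/fill-loop machinery entirely and builds the OrderedDict in one comprehension with data_json.get(field, 'None'); B does not mutate data_json (return-value equivalence only).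
import Mathlib
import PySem

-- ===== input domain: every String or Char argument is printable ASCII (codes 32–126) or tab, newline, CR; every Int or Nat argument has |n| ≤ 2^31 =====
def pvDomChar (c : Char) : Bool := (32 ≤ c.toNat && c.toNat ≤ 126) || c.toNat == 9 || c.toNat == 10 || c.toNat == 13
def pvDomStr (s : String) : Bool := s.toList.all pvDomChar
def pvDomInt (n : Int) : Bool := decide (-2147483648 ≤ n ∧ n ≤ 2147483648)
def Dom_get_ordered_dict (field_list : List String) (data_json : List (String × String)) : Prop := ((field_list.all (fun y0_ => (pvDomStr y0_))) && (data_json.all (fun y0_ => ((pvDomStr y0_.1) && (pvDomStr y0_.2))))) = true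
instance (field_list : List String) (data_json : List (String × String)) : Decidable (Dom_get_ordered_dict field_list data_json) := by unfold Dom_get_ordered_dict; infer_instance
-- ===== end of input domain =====

-- B builds the OrderedDict directly with a defaulted lookup, with no set machinery and no
-- fill pass (objective: simpler). Equivalence is about the RETURN value only: A mutates
-- data_json (adds missing keys with value "None"); B does not mutate it.

-- ===== PORT A =====
-- The loop `for result in results: data_json[result] = "None"` iterates a Python set; its
-- iteration order is not modelled, but the dict is only looked up afterwards and every
-- inserted value is "None", so the returned value does not depend on that order.
def get_ordered_dict (field_list : List String) (data_json : List (String × String)) : List (String × String) :=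
  let dj := PySem.Dict.ofList data_json
  let valid_field_order := field_list.filter (fun field => dj.contains field)
  let set_A := PySem.Set.ofList valid_field_order
  let set_B := PySem.Set.ofList field_list
  let results := PySem.Set.symmDiff set_A set_B
  let dj2 := results.foldl (fun d r => d.insert r "None") dj
  (PySem.Dict.ofList (field_list.map (fun field => (field, dj2.getD field "")))).items

-- ===== PORT B =====
def get_ordered_dict_alt (field_list : List String) (data_json : List (String × String)) : List (String × String) :=
  let dj := PySem.Dict.ofList data_json
  (PySem.Dict.ofList (field_list.map (fun field => (field, dj.getD field "None")))).items

-- ===== PRECONDITION & SPEC =====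
def Spec_get_ordered_dict (field_list : List String) (data_json : List (String × String)) (out : List (String × String)) : Prop := out = get_ordered_dict_alt field_list data_json
instance (field_list : List String) (data_json : List (String × String)) (out : List (String × String)) : Decidable (Spec_get_ordered_dict field_list data_json out) := by unfold Spec_get_ordered_dict; infer_instance

-- ===== CLAIM =====
def Claim_equal_get_ordered_dict : Prop := ∀ (field_list : List String) (data_json : List (String × String)), Dom_get_ordered_dict field_list data_json → Spec_get_ordered_dict field_list data_json (get_ordered_dict field_list data_json)

-- ===== LEMMAS AND PROOFS =====

-- A's fill loop: inserting "None" at every key of rs.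
theorem fillA_get? (rs : List String) (d : PySem.Dict String String) (k : String) :
    (rs.foldl (fun d r => d.insert r "None") d).get? k
      = if k ∈ rs then some "None" else d.get? k := by
  induction rs generalizing d with
  | nil => simp
  | cons r t ih =>
    simp only [List.foldl_cons, ih, PySem.Dict.get?_insert, List.mem_cons]
    by_cases hkt : k ∈ t <;> by_cases hkr : k = r <;> simp [hkt, hkr]

-- membership in A's symmetric difference = "in field_list but not a key of dj"
theorem mem_results (fl : List String) (dj : PySem.Dict String String) (k : String) :
    k ∈ PySem.Set.symmDiff (PySem.Set.ofList (fl.filter (fun f => dj.contains f)))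
          (PySem.Set.ofList fl)
      ↔ k ∈ fl ∧ dj.contains k = false := by
  simp only [PySem.Set.mem_symmDiff, PySem.Set.mem_ofList, List.mem_filter]
  constructor
  · rintro (⟨⟨hmem, hc⟩, hnot⟩ | ⟨hmem, hnot⟩)
    · exact absurd hmem hnot
    · refine ⟨hmem, ?_⟩
      by_cases hc : dj.contains k
      · exact absurd ⟨hmem, hc⟩ hnot
      · simpa using hc
  · rintro ⟨hmem, hc⟩
    exact Or.inr ⟨hmem, fun h => by simp [hc] at h⟩

-- ===== VERDICT =====
theorem get_ordered_dict_spec : Claim_equal_get_ordered_dict := by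
  intro fl dj0 _
  unfold Spec_get_ordered_dict get_ordered_dict get_ordered_dict_alt
  simp only []
  congr 2
  apply List.map_congr_left
  intro k hk
  have hA := fillA_get? (PySem.Set.symmDiff
      (PySem.Set.ofList (fl.filter (fun f => (PySem.Dict.ofList dj0).contains f)))
      (PySem.Set.ofList fl)) (PySem.Dict.ofList dj0) k
  have hmem := mem_results fl (PySem.Dict.ofList dj0) k
  rw [PySem.Dict.getD_eq_get?_getD, PySem.Dict.getD_eq_get?_getD, hA]
  by_cases hc : (PySem.Dict.ofList dj0).contains k
  · simp only [hmem, hc]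
    have : ¬ (k ∈ fl ∧ (true : Bool) = false) := by simp
    rw [if_neg this]
    cases hg : (PySem.Dict.ofList dj0).get? k with
    | none =>
      have := (PySem.Dict.get?_eq_none_iff_contains _ k).mp hg
      simp [hc] at this
    | some v => simp
  · simp only [Bool.not_eq_true] at hc
    rw [if_pos (hmem.mpr ⟨hk, hc⟩)]
    have hg : (PySem.Dict.ofList dj0).get? k = none :=
      (PySem.Dict.get?_eq_none_iff_contains _ k).mpr hc
    simp [hg]
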